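-- pv_equiv track=rewrite | github.com/Luks9/geo-rota | geo_rota/services/roteirizacao_service.py | _somar_metricas_da_rota
-- ===== SOURCE A (Python) =====
-- from typing import Dict, List, Optional, Sequence, Tuple
--
-- def _somar_metricas_da_rota(matriz: Sequence[Sequence[int]], rota_nodes: Sequence[int]) -> int:
--     total = 0
--     atual = 0
--     for node in rota_nodes:
--         total += matriz[atual][node]
--         atual = node
--     total += matriz[atual][0]
--     return total
-- ===== SOURCE B (Python) =====
-- def _somar_metricas_da_rota(matriz, rota_nodes):
--     # Aggregate the cycle's edges into a multiplicity dict, then take one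
--     # weighted sum over the DISTINCT edges (cost * multiplicity).
--     arestas = list(zip([0] + list(rota_nodes), list(rota_nodes) + [0]))
--     contagem = {}
--     for e in arestas:
--         contagem[e] = contagem.get(e, 0) + 1
--     return sum(matriz[a][b] * vezes for (a, b), vezes in contagem.items())
-- ===== Notes on version B (the rewrite author's own statement) =====
-- stated objective: alternative
-- what changed: Instead of accumulating matrix costs edge-by-edge along the route with a mutable current node, B aggregates the cycle's edges into a multiplicity dictionary and computes one weighted sum of cost * multiplicity over the distinct edges, so each distinct matrix cell is read once.
import Mathlib
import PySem

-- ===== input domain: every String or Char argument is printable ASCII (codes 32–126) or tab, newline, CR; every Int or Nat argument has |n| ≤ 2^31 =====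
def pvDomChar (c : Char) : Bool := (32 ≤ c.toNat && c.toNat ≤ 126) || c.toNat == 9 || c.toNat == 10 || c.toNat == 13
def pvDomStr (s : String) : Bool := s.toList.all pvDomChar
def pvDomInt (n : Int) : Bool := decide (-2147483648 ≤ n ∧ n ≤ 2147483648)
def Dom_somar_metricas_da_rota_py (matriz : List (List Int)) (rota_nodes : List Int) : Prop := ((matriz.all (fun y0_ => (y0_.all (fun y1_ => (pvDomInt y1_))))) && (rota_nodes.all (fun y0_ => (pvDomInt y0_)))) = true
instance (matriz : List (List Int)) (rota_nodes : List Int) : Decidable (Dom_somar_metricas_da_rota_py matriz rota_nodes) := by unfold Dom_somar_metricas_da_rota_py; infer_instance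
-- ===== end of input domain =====

-- B aggregates the cycle's edges into a multiplicity dict and returns one weighted
-- sum cost*multiplicity over distinct edges, replacing A's mutable-current-node
-- accumulator loop (alternative decomposition; same asymptotic cost).


-- ===== PORT A =====
-- matriz[i][j] with default 0, shared by both ports; Pre_ guarantees the access succeeds, matching Python exactly there
def pvCellA (matriz : List (List Int)) (i j : Int) : Int :=
  ((PySem.List.pyGet? matriz i).bind (fun row => PySem.List.pyGet? row j)).getD 0

def somar_metricas_da_rota_py (matriz : List (List Int)) (rota_nodes : List Int) : Int :=
  let st := rota_nodes.foldl
    (fun (st : Int × Int) node => (st.1 + pvCellA matriz st.2 node, node)) (0, 0)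
  st.1 + pvCellA matriz st.2 0

-- ===== PORT B =====
def somar_metricas_da_rota_py_alt (matriz : List (List Int)) (rota_nodes : List Int) : Int :=
  let arestas : List (Int × Int) := (0 :: rota_nodes).zip (rota_nodes ++ [0])
  let contagem : PySem.Dict (Int × Int) Int :=
    arestas.foldl (fun d e => d.insert e (d.getD e 0 + 1)) PySem.Dict.empty
  (contagem.items.map (fun p => pvCellA matriz p.1.1 p.1.2 * p.2)).sum

-- ===== PRECONDITION & SPEC =====
-- Pre_ is exactly where Python A returns (no IndexError): for each consecutive pair (a, b)
-- of the cycle 0, rota_nodes..., 0, row index a and column index b are valid (possibly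
-- negative, Python-style) indices into matriz resp. its row a.
def Pre_somar_metricas_da_rota_py (matriz : List (List Int)) (rota_nodes : List Int) : Prop :=
  ∀ p ∈ (((0 : Int) :: rota_nodes).zip (rota_nodes ++ [0])),
    PySem.Raise.InRange matriz.length p.1 ∧
    PySem.Raise.InRange (PySem.List.pyGetD matriz p.1 []).length p.2
instance (matriz : List (List Int)) (rota_nodes : List Int) : Decidable (Pre_somar_metricas_da_rota_py matriz rota_nodes) := by unfold Pre_somar_metricas_da_rota_py; infer_instance

def pvWitness_somar_metricas_da_rota_py : List (List Int) × List Int :=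
  ([[0, 1, 2], [3, 4, 5], [6, 7, 8]], [2, 1])

def Spec_somar_metricas_da_rota_py (matriz : List (List Int)) (rota_nodes : List Int) (out : Int) : Prop := out = somar_metricas_da_rota_py_alt matriz rota_nodes
instance (matriz : List (List Int)) (rota_nodes : List Int) (out : Int) : Decidable (Spec_somar_metricas_da_rota_py matriz rota_nodes out) := by unfold Spec_somar_metricas_da_rota_py; infer_instance

-- ===== CLAIM (what is proved, stated in full; the proofs are below) =====
def Claim_equal_somar_metricas_da_rota_py : Prop := ∀ (matriz : List (List Int)) (rota_nodes : List Int), Dom_somar_metricas_da_rota_py matriz rota_nodes → Pre_somar_metricas_da_rota_py matriz rota_nodes → Spec_somar_metricas_da_rota_py matriz rota_nodes (somar_metricas_da_rota_py matriz rota_nodes)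

-- ===== LEMMAS AND PROOFS =====

-- A's fold from current node a and accumulator t, plus the return-to-start term,
-- equals t plus the sum of the cells over the adjacent pairs of the path a :: r ++ [0].
theorem pv_fold_eq_pairs (m : List (List Int)) (r : List Int) (a t : Int) :
    (let st := r.foldl (fun (st : Int × Int) node => (st.1 + pvCellA m st.2 node, node)) (t, a)
     st.1 + pvCellA m st.2 0)
    = t + (((a :: r).zip (r ++ [0])).map (fun p => pvCellA m p.1 p.2)).sum := by
  induction r generalizing a t with
  | nil => simp
  | cons n rs ih =>
      simpa [List.foldl_cons, add_assoc] using ih n (t + pvCellA m a n)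

-- picking out the single index x of a duplicate-free list
theorem pv_sum_ite_single {α : Type} [BEq α] [LawfulBEq α] (S : List α) (hS : S.Nodup)
    (x : α) (hx : x ∈ S) (g : α → Int) :
    (S.map (fun k => if k == x then g k else 0)).sum = g x := by
  induction S with
  | nil => cases hx
  | cons s S ih =>
      rcases List.mem_cons.mp hx with rfl | hx
      · have hnotin : x ∉ S := (List.nodup_cons.mp hS).1
        have hz : (S.map (fun k => if k == x then g k else 0)).sum = 0 := by
          apply List.sum_eq_zero
          intro y hy
          rcases List.mem_map.mp hy with ⟨k, hk, rfl⟩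
          have : k ≠ x := fun h => hnotin (h ▸ hk)
          simp [this]
        simp [hz]
      · have hne : s ≠ x := fun h => ((List.nodup_cons.mp hS).1 (h ▸ hx))
        simpa [hne] using ih (List.nodup_cons.mp hS).2 hx

-- the multiplicity-weighted sum over any duplicate-free cover of l equals the plain sum over l
theorem pv_weighted_sum {α : Type} [BEq α] [LawfulBEq α] (f : α → Int) (l S : List α)
    (hS : S.Nodup) (hcov : ∀ x ∈ l, x ∈ S) :
    (S.map (fun k => f k * (l.count k : Int))).sum = (l.map f).sum := by
  induction l with
  | nil => simp
  | cons x l ih =>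
      have hx : x ∈ S := hcov x (by simp)
      have hcov' : ∀ y ∈ l, y ∈ S := fun y hy => hcov y (by simp [hy])
      have step : (S.map (fun k => f k * ((x :: l).count k : Int))).sum
          = (S.map (fun k => f k * (l.count k : Int))).sum
            + (S.map (fun k => if k == x then f k else 0)).sum := by
        rw [← List.sum_map_add]
        apply congrArg
        apply List.map_congr_left
        intro k _
        by_cases h : k = x
        · subst h; simp [List.count_cons_self]; ring
        · have hc : (x :: l).count k = l.count k := by
            simp [Ne.symm h]
          simp [hc, h]
      rw [step, ih hcov', pv_sum_ite_single S hS x hx f]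
      simp [add_comm]

-- ===== VERDICT (by name: the statement is the Claim_ definition above) =====
theorem somar_metricas_da_rota_py_spec : Claim_equal_somar_metricas_da_rota_py := by
  intro matriz rota_nodes _ _
  unfold Spec_somar_metricas_da_rota_py somar_metricas_da_rota_py somar_metricas_da_rota_py_alt
  dsimp only
  rw [PySem.Dict.foldl_insert_getD_add_one_eq_counter, PySem.Dict.items_counter]
  rw [List.map_map]
  have := pv_weighted_sum (fun p : Int × Int => pvCellA matriz p.1 p.2)
    (((0 : Int) :: rota_nodes).zip (rota_nodes ++ [0]))
    (PySem.Set.ofList (((0 : Int) :: rota_nodes).zip (rota_nodes ++ [0])))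
    (PySem.Set.nodup_ofList _) (fun x hx => (PySem.Set.mem_ofList _ _).mpr hx)
  simp only [Function.comp_def]
  dsimp only at this ⊢
  rw [this]
  simpa using pv_fold_eq_pairs matriz rota_nodes 0 0
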